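-- pv_equiv track=rewrite | github.com/himi1/Codefights | Tournaments/CodeMaster'sTourneySolutionsPart3.py | largestDistance
-- ===== SOURCE A (Python) =====
-- def largestDistance(a):
--
--     mx = [a[0], a[1]]
--     mn = [a[0], a[1]]
--     for i in range(len(a)):
--         k = i % 2
--         if a[i] > mx[k]:
--             mx[k] = a[i]
--         elif a[i] < mn[k]:
--             mn[k] = a[i]
--     return max(mx[0] - mn[0], mx[1] - mn[1])
-- ===== SOURCE B (Python) =====
-- def largestDistance(a):
--     even = a[0::2]
--     odd = a[1::2]
--     return max(max(even) - min(even), max(odd) - min(odd))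
-- ===== Notes on version B (the rewrite author's own statement) =====
-- stated objective: idiomatic
-- what changed: Replaces the interleaved index loop with four running accumulators and an elif by slicing into the even- and odd-indexed subsequences and taking builtin max/min reductions of each.
import Mathlib
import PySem

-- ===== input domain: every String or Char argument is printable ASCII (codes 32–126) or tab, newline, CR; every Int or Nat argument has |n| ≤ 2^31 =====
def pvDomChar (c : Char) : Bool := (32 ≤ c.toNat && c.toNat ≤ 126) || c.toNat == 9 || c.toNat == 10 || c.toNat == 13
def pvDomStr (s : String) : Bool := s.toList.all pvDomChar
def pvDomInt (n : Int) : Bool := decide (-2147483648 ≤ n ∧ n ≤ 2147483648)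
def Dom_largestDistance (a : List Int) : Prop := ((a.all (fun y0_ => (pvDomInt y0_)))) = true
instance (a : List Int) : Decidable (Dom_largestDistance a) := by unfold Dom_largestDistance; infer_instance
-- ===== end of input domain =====

-- B replaces A's interleaved four-accumulator index loop by slicing the list into its
-- even- and odd-indexed subsequences and taking builtin max/min reductions of each (idiomatic).


-- ===== PORT A =====
-- literal transliteration of A: mx = [a[0], a[1]], mn = [a[0], a[1]], one loop over
-- range(len(a)) with k = i % 2 and the if/elif update; state is (mx0, mx1, mn0, mn1).
def largestDistance (a : List Int) : Int :=
  match PySem.List.pyGet? a 0 with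
  | none => 0   -- IndexError in Python (empty list): outside Pre_
  | some a0 =>
    match PySem.List.pyGet? a 1 with
    | none => 0   -- IndexError in Python (len < 2): outside Pre_
    | some a1 =>
      let s := (PySem.List.pyRange 0 (PySem.List.len a) 1).foldl
        (fun (st : Int × Int × Int × Int) i =>
          let ai := PySem.List.pyGetD a i 0   -- a[i]; i is always in range here
          if PySem.Int.mod i 2 = 0 then
            if ai > st.1 then (ai, st.2.1, st.2.2.1, st.2.2.2)
            else if ai < st.2.2.1 then (st.1, st.2.1, ai, st.2.2.2) else st
          else
            if ai > st.2.1 then (st.1, ai, st.2.2.1, st.2.2.2)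
            else if ai < st.2.2.2 then (st.1, st.2.1, st.2.2.1, ai) else st)
        (a0, a1, a0, a1)
      max (s.1 - s.2.2.1) (s.2.1 - s.2.2.2)

-- ===== PORT B =====
-- literal transliteration of Source B: even = a[0::2], odd = a[1::2], then
-- max(max(even)-min(even), max(odd)-min(odd)); max/min of an empty list raise (outside Pre_).
def largestDistance_alt (a : List Int) : Int :=
  let even := (PySem.List.slice? a (some 0) none 2).getD []
  let odd := (PySem.List.slice? a (some 1) none 2).getD []
  match PySem.List.max? even (fun y => y) with
  | none => 0   -- ValueError in Python (max of empty): outside Pre_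
  | some mxe =>
    match PySem.List.min? even (fun y => y) with
    | none => 0
    | some mne =>
      match PySem.List.max? odd (fun y => y) with
      | none => 0   -- ValueError in Python (min/max of empty): outside Pre_
      | some mxo =>
        match PySem.List.min? odd (fun y => y) with
        | none => 0
        | some mno => max (mxe - mne) (mxo - mno)

-- ===== PRECONDITION & SPEC =====
-- Pre_ excludes exactly the lists of length < 2, on which Python A raises IndexError (at a[1]).
def Pre_largestDistance (a : List Int) : Prop := 2 ≤ a.length
instance (a : List Int) : Decidable (Pre_largestDistance a) := by unfold Pre_largestDistance; infer_instance
def pvWitness_largestDistance : List Int := [3, -1, 7, 2]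

def Spec_largestDistance (a : List Int) (out : Int) : Prop := out = largestDistance_alt a
instance (a : List Int) (out : Int) : Decidable (Spec_largestDistance a out) := by unfold Spec_largestDistance; infer_instance

-- ===== CLAIM (what is proved, stated in full; the proofs are below) =====
def Claim_equal_largestDistance : Prop := ∀ (a : List Int), Dom_largestDistance a → Pre_largestDistance a → Spec_largestDistance a (largestDistance a)

-- ===== LEMMAS AND PROOFS =====

-- the even-indexed subsequence (a[0::2])
def everyOther : List Int → List Int
  | [] => []
  | [x] => [x]
  | x :: _ :: t => x :: everyOther t

theorem everyOther_cons (x : Int) (t : List Int) :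
    everyOther (x :: t) = x :: everyOther t.tail := by
  cases t <;> simp [everyOther]

-- A's loop body, with the index already a Nat and the element passed directly
def stepF (st : Int × Int × Int × Int) (k : Nat) (ai : Int) : Int × Int × Int × Int :=
  if k % 2 = 0 then
    if ai > st.1 then (ai, st.2.1, st.2.2.1, st.2.2.2)
    else if ai < st.2.2.1 then (st.1, st.2.1, ai, st.2.2.2) else st
  else
    if ai > st.2.1 then (st.1, ai, st.2.2.1, st.2.2.2)
    else if ai < st.2.2.2 then (st.1, st.2.1, st.2.2.1, ai) else st

-- A's loop, recast as structural recursion consuming two elements per step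
def coreA : List Int → Int × Int × Int × Int → Int × Int × Int × Int
  | [], st => st
  | [x], st =>
      if x > st.1 then (x, st.2.1, st.2.2.1, st.2.2.2)
      else if x < st.2.2.1 then (st.1, st.2.1, x, st.2.2.2) else st
  | x :: y :: t, st =>
      let st1 := if x > st.1 then (x, st.2.1, st.2.2.1, st.2.2.2)
                 else if x < st.2.2.1 then (st.1, st.2.1, x, st.2.2.2) else st
      let st2 := if y > st1.2.1 then (st1.1, y, st1.2.2.1, st1.2.2.2)
                 else if y < st1.2.2.2 then (st1.1, st1.2.1, st1.2.2.1, y) else st1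
      coreA t st2

-- indexed fold over range' j becomes a fold over the list zipped with its indices
theorem foldl_range'_getD {S : Type} (F : S → Nat → Int → S) :
    ∀ (t : List Int) (j : Nat) (s : S),
    (List.range' j t.length).foldl (fun s k => F s k (t.getD (k - j) 0)) s
    = (t.zipIdx j).foldl (fun s p => F s p.2 p.1) s := by
  intro t
  induction t with
  | nil => intro j s; simp
  | cons x t ih =>
      intro j s
      rw [List.length_cons, List.range'_succ, List.zipIdx_cons]
      simp only [List.foldl_cons, Nat.sub_self, List.getD_cons_zero]
      rw [PySem.List.foldl_congr_mem _ _
            (fun s k => F s k (t.getD (k - (j + 1)) 0)) _ ?_]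
      · exact ih (j + 1) _
      · intro acc k hk
        have hk2 : j + 1 ≤ k := (List.mem_range'_1.mp hk).1
        have hke : k - j = (k - (j + 1)) + 1 := by omega
        simp [hke]

theorem foldl_range_getD (t : List Int) (s : Int × Int × Int × Int) :
    (List.range t.length).foldl (fun s k => stepF s k (t.getD k 0)) s
    = (t.zipIdx 0).foldl (fun s p => stepF s p.2 p.1) s := by
  have h := foldl_range'_getD stepF t 0 s
  simp only [Nat.sub_zero] at h
  rw [List.range_eq_range']
  exact h

-- the zipped fold, indices starting at an even j, is coreA on the suffix
theorem zip_eq_coreA : ∀ (t : List Int) (j : Nat), j % 2 = 0 →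
    ∀ (st : Int × Int × Int × Int),
    (t.zipIdx j).foldl (fun s p => stepF s p.2 p.1) st = coreA t st
  | [], j, hj, st => by simp [coreA]
  | [x], j, hj, st => by simp [coreA, stepF, hj]
  | x :: y :: t, j, hj, st => by
      have h1 : ¬ ((j + 1) % 2 = 0) := by omega
      rw [List.zipIdx_cons, List.zipIdx_cons, List.foldl_cons, List.foldl_cons,
          zip_eq_coreA t (j + 2) (by omega)]
      simp only [coreA]
      congr 1
      simp only [stepF, hj, h1, if_pos, if_false]
  termination_by t => t.length

-- under the invariant mn ≤ mx, A's if/elif update is just (max, min) in each slot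
theorem coreA_char : ∀ (t : List Int) (mx0 mx1 mn0 mn1 : Int),
    mn0 ≤ mx0 → mn1 ≤ mx1 →
    coreA t (mx0, mx1, mn0, mn1) =
      ((everyOther t).foldl max mx0, (everyOther t.tail).foldl max mx1,
       (everyOther t).foldl min mn0, (everyOther t.tail).foldl min mn1)
  | [], mx0, mx1, mn0, mn1, _, _ => by simp [coreA, everyOther]
  | [x], mx0, mx1, mn0, mn1, h0, h1 => by
      simp only [coreA, everyOther, List.tail, List.foldl]
      split_ifs <;> simp_all <;> omega
  | x :: y :: t, mx0, mx1, mn0, mn1, h0, h1 => by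
      have step : coreA (x :: y :: t) (mx0, mx1, mn0, mn1)
          = coreA t (max mx0 x, max mx1 y, min mn0 x, min mn1 y) := by
        simp only [coreA]
        split_ifs <;> (apply congrArg; (try simp_all); (try omega))
      rw [step, coreA_char t _ _ _ _ (by omega) (by omega)]
      simp [everyOther_cons]

-- range(len(xs)) is just the Nat indices, cast
theorem pyRange_len (xs : List Int) :
    PySem.List.pyRange 0 (PySem.List.len xs) 1 = List.map (fun k : Nat => (k : Int)) (List.range xs.length) := by
  rw [PySem.List.pyRange_one]; simp [PySem.List.len]

-- A's whole loop is coreA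
theorem portA_loop (xs : List Int) (st : Int × Int × Int × Int) :
    (PySem.List.pyRange 0 (PySem.List.len xs) 1).foldl
      (fun (st : Int × Int × Int × Int) i =>
        let ai := PySem.List.pyGetD xs i 0
        if PySem.Int.mod i 2 = 0 then
          if ai > st.1 then (ai, st.2.1, st.2.2.1, st.2.2.2)
          else if ai < st.2.2.1 then (st.1, st.2.1, ai, st.2.2.2) else st
        else
          if ai > st.2.1 then (st.1, ai, st.2.2.1, st.2.2.2)
          else if ai < st.2.2.2 then (st.1, st.2.1, st.2.2.1, ai) else st) st
    = coreA xs st := by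
  rw [pyRange_len, List.foldl_map]
  rw [PySem.List.foldl_congr_mem _ _
        (fun (st : Int × Int × Int × Int) (k : Nat) => stepF st k (xs.getD k 0)) _ ?_]
  · rw [foldl_range_getD, zip_eq_coreA _ 0 rfl]
  · intro acc k hk
    have hm : PySem.Int.mod (k : Int) 2 = ((k % 2 : Nat) : Int) := by
      simp [PySem.Int.mod, Int.fmod_eq_emod]
    simp only [hm, PySem.List.pyGetD_natCast, stepF, Int.natCast_eq_zero]

theorem filterMap_two (ys : List Int) : ∀ (n : Nat), n = (ys.length + 1) / 2 →
    (List.range n).filterMap (fun k => ys[2 * k]?) = everyOther ys := by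
  induction ys using everyOther.induct with
  | case1 => intro n hn; simp at hn; subst hn; simp [everyOther]
  | case2 x => intro n hn; simp at hn; subst hn; simp [everyOther]
  | case3 x y t ih =>
      intro n hn
      have hn' : n = ((t.length + 1) / 2) + 1 := by simp at hn; omega
      subst hn'
      rw [List.range_succ_eq_map]
      simp only [List.filterMap_cons, List.filterMap_map]
      have hsk : ∀ k : Nat, ((x :: y :: t)[2 * (Nat.succ k)]? : Option Int) = t[2 * k]? := by
        intro k
        have h2 : 2 * (Nat.succ k) = (2 * k) + 1 + 1 := by omega
        simp [h2]
      simp only [Function.comp_def, hsk]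
      simp [everyOther, ih _ rfl]

theorem slice_even (xs : List Int) :
    PySem.List.slice? xs (some 0) none 2 = some (everyOther xs) := by
  simp only [PySem.List.slice?, PySem.List.sliceIndices]
  norm_num
  rcases Nat.eq_zero_or_pos xs.length with h | h
  · simp_all [List.length_eq_zero_iff.mp h, everyOther]
  · rw [if_pos h]
    have hc : (((xs.length : Int) + 2 - 1) / 2).toNat = (xs.length + 1) / 2 := by omega
    have hf : (fun x : Nat => xs[(2 * (x : Int)).toNat]?) = (fun x : Nat => xs[2 * x]?) := by
      funext k
      have h2 : ((2 : Int) * (k : Int)).toNat = 2 * k := by omega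
      rw [h2]
    rw [hc, hf, filterMap_two xs _ rfl]

theorem slice_odd (xs : List Int) :
    PySem.List.slice? xs (some 1) none 2 = some (everyOther xs.tail) := by
  simp only [PySem.List.slice?, PySem.List.sliceIndices]
  norm_num
  cases xs with
  | nil => simp [everyOther]
  | cons z t =>
      have hmin : min (1 : Int) ((z :: t).length : Int) = 1 := by
        simp
      rw [hmin]
      by_cases h1 : 1 < (z :: t).length
      · rw [if_pos h1]
        have hc : ((((z :: t).length : Int) - 1 + 2 - 1) / 2).toNat = (t.length + 1) / 2 := by
          simp; omega
        have hf : (fun x : Nat => (z :: t)[((1 : Int) + 2 * (x : Int)).toNat]?) =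
            (fun x : Nat => t[2 * x]?) := by
          funext k
          have he : ((1 : Int) + 2 * (k : Int)).toNat = 2 * k + 1 := by omega
          simp [he]
        rw [hc, hf, filterMap_two t _ rfl]
        simp
      · rw [if_neg h1]
        have ht : t = [] := by simp at h1; exact h1
        simp [ht, everyOther]

-- ===== VERDICT (by name: the statement is the Claim_ definition above) =====
theorem largestDistance_spec : Claim_equal_largestDistance := by
  intro a _ hpre
  unfold Pre_largestDistance at hpre
  unfold Spec_largestDistance
  obtain ⟨a0, a1, t, rfl⟩ : ∃ a0 a1 t, a = a0 :: a1 :: t := by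
    cases a with
    | nil => simp at hpre
    | cons a0 r => cases r with
      | nil => simp at hpre
      | cons a1 t => exact ⟨a0, a1, t, rfl⟩
  unfold largestDistance largestDistance_alt
  have hg0 : PySem.List.pyGet? (a0 :: a1 :: t) 0 = some a0 := by
    rw [show (0 : Int) = ((0 : Nat) : Int) by norm_num, PySem.List.pyGet?_natCast]; simp
  have hg1 : PySem.List.pyGet? (a0 :: a1 :: t) 1 = some a1 := by
    rw [show (1 : Int) = ((1 : Nat) : Int) by norm_num, PySem.List.pyGet?_natCast]; simp
  rw [hg0, hg1, slice_even, slice_odd]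
  simp only [Option.getD_some]
  rw [portA_loop, coreA_char _ _ _ _ _ le_rfl le_rfl]
  simp only [everyOther_cons, List.tail_cons]
  rw [PySem.List.max?_id_cons, PySem.List.min?_id_cons,
      PySem.List.max?_id_cons, PySem.List.min?_id_cons]
  simp
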